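-- pv_equiv track=rewrite | github.com/lwenyuan61-sudo/openclaw-evolution | agent-current/core/scripts/signal_probe.py | trim_snapshot_map
-- ===== SOURCE A (Python) =====
-- def trim_snapshot_map(items: dict, max_items: int) -> dict:
--     if len(items) <= max_items:
--         return items
--     trimmed = dict(items)
--     while len(trimmed) > max_items:
--         first = next(iter(trimmed))
--         trimmed.pop(first, None)
--     return trimmed
-- ===== SOURCE B (Python) =====
-- def trim_snapshot_map(items: dict, max_items: int) -> dict:
--     if len(items) <= max_items:
--         return items
--     it = iter(items)
--     for _ in range(len(items) - max_items):
--         next(it)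
--     return {k: items[k] for k in it}
-- ===== Notes on version B (the rewrite author's own statement) =====
-- stated objective: simpler
-- what changed: Instead of copying the dict and repeatedly popping the first key in a while-loop, B skips the first len-max_items keys with one forward iterator pass and collects the remaining tail in a single dict comprehension.
import Mathlib
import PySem

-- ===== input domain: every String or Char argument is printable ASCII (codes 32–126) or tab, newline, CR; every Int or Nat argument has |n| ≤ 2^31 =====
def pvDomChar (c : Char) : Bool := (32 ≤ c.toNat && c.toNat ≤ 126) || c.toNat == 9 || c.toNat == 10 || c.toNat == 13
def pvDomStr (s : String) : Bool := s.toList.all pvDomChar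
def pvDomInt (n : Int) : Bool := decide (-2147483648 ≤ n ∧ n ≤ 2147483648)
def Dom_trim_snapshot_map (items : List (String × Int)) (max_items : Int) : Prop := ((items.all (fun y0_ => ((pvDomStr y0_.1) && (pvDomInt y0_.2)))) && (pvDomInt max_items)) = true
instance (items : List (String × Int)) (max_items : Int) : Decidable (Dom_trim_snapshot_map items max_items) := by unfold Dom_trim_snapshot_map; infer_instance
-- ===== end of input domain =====

-- B replaces A's copy-and-pop-first while-loop by one forward skip of the head plus a tail collection (simpler, same cost); return-value equivalence only (A returns the argument object unchanged when no trimming is needed, B does too).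

-- ===== PORT A =====
-- 'while len(trimmed) > max_items: trimmed.pop(next(iter(trimmed)))' — popping the first
-- key of a dict removes the head entry of the association list; the [] branch under a true
-- guard is where Python raises StopIteration (excluded by Pre_).
def trimWhileA (trimmed : List (String × Int)) (max_items : Int) : List (String × Int) :=
  if (trimmed.length : Int) > max_items then
    match trimmed with
    | [] => []          -- Python: next(iter({})) raises StopIteration; outside Pre_
    | _ :: rest => trimWhileA rest max_items
  else trimmed

def trim_snapshot_map (items : List (String × Int)) (max_items : Int) : List (String × Int) :=
  if (items.length : Int) ≤ max_items then items
  else trimWhileA items max_items    -- trimmed = dict(items) is the copy the loop mutates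

-- ===== PORT B =====
-- guard, then advance the iterator past the first (len - max_items) keys and collect the tail
def trim_snapshot_map_alt (items : List (String × Int)) (max_items : Int) : List (String × Int) :=
  if (items.length : Int) ≤ max_items then items
  else items.drop ((items.length : Int) - max_items).toNat

-- ===== PRECONDITION & SPEC =====
-- Pre_ excludes negative max_items: there Python A (and B alike) raises StopIteration.
def Pre_trim_snapshot_map (items : List (String × Int)) (max_items : Int) : Prop := 0 ≤ max_items
instance (items : List (String × Int)) (max_items : Int) : Decidable (Pre_trim_snapshot_map items max_items) := by unfold Pre_trim_snapshot_map; infer_instance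
def pvWitness_trim_snapshot_map : (List (String × Int)) × Int := ([("a", 1), ("b", 2), ("c", 3)], 1)

def Spec_trim_snapshot_map (items : List (String × Int)) (max_items : Int) (out : List (String × Int)) : Prop := out = trim_snapshot_map_alt items max_items
instance (items : List (String × Int)) (max_items : Int) (out : List (String × Int)) : Decidable (Spec_trim_snapshot_map items max_items out) := by unfold Spec_trim_snapshot_map; infer_instance

-- ===== CLAIM (what is proved, stated in full; the proofs are below) =====
def Claim_equal_trim_snapshot_map : Prop := ∀ (items : List (String × Int)) (max_items : Int), Dom_trim_snapshot_map items max_items → Pre_trim_snapshot_map items max_items → Spec_trim_snapshot_map items max_items (trim_snapshot_map items max_items)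

-- ===== LEMMAS AND PROOFS =====
theorem trimWhileA_eq_drop (l : List (String × Int)) (m : Int) (hm : 0 ≤ m) :
    trimWhileA l m = l.drop ((l.length : Int) - m).toNat := by
  induction l with
  | nil =>
      unfold trimWhileA
      rw [if_neg (by simp; omega)]
      simp
  | cons h t ih =>
      unfold trimWhileA
      by_cases hc : ((h :: t).length : Int) > m
      · have h1 : (((h :: t).length : Int) - m).toNat = ((t.length : Int) - m).toNat + 1 := by
          simp at hc ⊢; omega
        rw [if_pos hc, h1, List.drop_succ_cons]
        exact ih
      · have h0 : (((h :: t).length : Int) - m).toNat = 0 := by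
          simp at hc ⊢; omega
        rw [if_neg hc, h0, List.drop_zero]

-- ===== VERDICT (by name: the statement is the Claim_ definition above) =====
theorem trim_snapshot_map_spec : Claim_equal_trim_snapshot_map := by
  intro items max_items _ hpre
  unfold Spec_trim_snapshot_map trim_snapshot_map trim_snapshot_map_alt
  by_cases hle : (items.length : Int) ≤ max_items
  · simp [hle]
  · simp [hle, trimWhileA_eq_drop items max_items hpre]
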